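-- pv_equiv track=rewrite | github.com/damarisarmoa12/Intro | parcialpython.py | verificar_transacciones
-- ===== SOURCE A (Python) =====
-- def ap_antes_corte (c : str, s : str) -> int:
--    res = 0
--    i = 0
--    saldo = 0
--
--    while i < len(s):
--       if s[i] == "r":
--          saldo += 350
--       if s[i] == "v":
--          saldo -= 56
--       if s[i] == c:
--          res += 1
--       if s[i] == "x" or saldo < 0:
--          break
--       i += 1
--
--    return res
--
-- def verificar_transacciones ( s  : str) -> int:
--    res = 0
--
--    for i in range(len(s)):
--       if s[i] == "r":
--          res += 350
--       elif s[i] == "v":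
--          res -= 56
--       elif s[i] == "s":
--          return res
--       elif s[i] == "x":
--          return 350*ap_antes_corte("r",s) - 56*ap_antes_corte("v",s)
--       if res < 0:
--          return res
--    return res
-- ===== SOURCE B (Python) =====
-- def verificar_transacciones(s: str) -> int:
--     res = 0
--     for ch in s:
--         if ch == "r":
--             res += 350
--         elif ch == "v":
--             res -= 56
--             if res < 0:
--                 return res
--         elif ch == "s" or ch == "x":
--             return res
--     return res
-- ===== Notes on version B (the rewrite author's own statement) =====
-- stated objective: simpler
-- what changed: B is one single pass keeping a running balance and returning it directly at a stop or cut character; it deletes the ap_antes_corte helper and the two extra full rescans A performs at a cut, since the running balance already equals 350*count_r - 56*count_v there.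
import Mathlib
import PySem

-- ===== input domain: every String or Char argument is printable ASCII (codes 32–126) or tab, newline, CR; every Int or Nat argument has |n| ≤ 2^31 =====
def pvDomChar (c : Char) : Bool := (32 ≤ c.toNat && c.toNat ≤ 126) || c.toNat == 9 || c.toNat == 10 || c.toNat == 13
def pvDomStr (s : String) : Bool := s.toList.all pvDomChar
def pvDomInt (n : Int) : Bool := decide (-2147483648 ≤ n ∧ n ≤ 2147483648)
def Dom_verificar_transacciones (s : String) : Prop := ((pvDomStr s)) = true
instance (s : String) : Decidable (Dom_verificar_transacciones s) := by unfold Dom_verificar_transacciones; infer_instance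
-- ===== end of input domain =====

-- B is a single pass keeping the running balance and returning it at 's'/'x';
-- it removes A's ap_antes_corte helper and its two full rescans (objective: simpler).

-- ===== PORT A =====
-- port of ap_antes_corte's while-loop: state (res, saldo), scanning the remaining chars
def apGo (c : Char) (l : List Char) (res saldo : Int) : Int :=
  match l with
  | [] => res
  | ch :: t =>
    let saldo1 := if ch = 'r' then saldo + 350 else saldo
    let saldo2 := if ch = 'v' then saldo1 - 56 else saldo1
    let res1 := if ch = c then res + 1 else res
    if ch = 'x' ∨ saldo2 < 0 then res1 else apGo c t res1 saldo2

def ap_antes_corte (c : Char) (s : List Char) : Int := apGo c s 0 0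

-- port of verificar_transacciones's for-loop; `full` is the whole string (A's x-branch rescans it)
def goA (full : List Char) (l : List Char) (res : Int) : Int :=
  match l with
  | [] => res
  | ch :: t =>
    if ch = 'r' then
      let res' := res + 350
      if res' < 0 then res' else goA full t res'
    else if ch = 'v' then
      let res' := res - 56
      if res' < 0 then res' else goA full t res'
    else if ch = 's' then res
    else if ch = 'x' then 350 * ap_antes_corte 'r' full - 56 * ap_antes_corte 'v' full
    else if res < 0 then res else goA full t res

def verificar_transacciones (s : String) : Int := goA s.toList s.toList 0

-- ===== PORT B =====
def goB (l : List Char) (res : Int) : Int :=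
  match l with
  | [] => res
  | ch :: t =>
    if ch = 'r' then goB t (res + 350)
    else if ch = 'v' then
      let res' := res - 56
      if res' < 0 then res' else goB t res'
    else if ch = 's' ∨ ch = 'x' then res
    else goB t res

def verificar_transacciones_alt (s : String) : Int := goB s.toList 0

-- ===== PRECONDITION & SPEC =====
def Spec_verificar_transacciones (s : String) (out : Int) : Prop := out = verificar_transacciones_alt s
instance (s : String) (out : Int) : Decidable (Spec_verificar_transacciones s out) := by unfold Spec_verificar_transacciones; infer_instance

-- ===== CLAIM (what is proved, stated in full; the proofs are below) =====
def Claim_equal_verificar_transacciones : Prop := ∀ (s : String), Dom_verificar_transacciones s → Spec_verificar_transacciones s (verificar_transacciones s)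

-- ===== LEMMAS AND PROOFS =====

-- one resumed step of ap_antes_corte's loop, for each kind of character
lemma apGo_step_rr (t : List Char) (cr cv : Int) (hres : 0 ≤ 350*cr-56*cv) :
    apGo 'r' ('r'::t) cr (350*cr-56*cv) = apGo 'r' t (cr+1) (350*(cr+1)-56*cv) := by
  simp [apGo]; rw [if_neg (by omega)]; ring_nf

lemma apGo_step_rv (t : List Char) (cr cv : Int) (hres : 0 ≤ 350*cr-56*cv) :
    apGo 'v' ('r'::t) cv (350*cr-56*cv) = apGo 'v' t cv (350*(cr+1)-56*cv) := by
  simp [apGo]; rw [if_neg (by omega)]; ring_nf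

lemma apGo_step_vr (t : List Char) (cr cv : Int) (hneg : ¬ 350*cr-56*cv-56 < 0) :
    apGo 'r' ('v'::t) cr (350*cr-56*cv) = apGo 'r' t cr (350*cr-56*(cv+1)) := by
  simp [apGo]; rw [if_neg (by omega)]; ring_nf

lemma apGo_step_vv (t : List Char) (cr cv : Int) (hneg : ¬ 350*cr-56*cv-56 < 0) :
    apGo 'v' ('v'::t) cv (350*cr-56*cv) = apGo 'v' t (cv+1) (350*cr-56*(cv+1)) := by
  simp [apGo]; rw [if_neg (by omega)]; ring_nf

-- at the break character 'x' both rescans stop, returning exactly the running counts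
lemma apGo_break_x (t : List Char) (cr cv : Int) :
    350 * apGo 'r' ('x'::t) cr (350*cr-56*cv) - 56 * apGo 'v' ('x'::t) cv (350*cr-56*cv)
      = 350*cr-56*cv := by
  simp [apGo]

-- a character that is none of r/v/x is skipped while the balance is nonnegative
lemma apGo_step_other (ch : Char) (t : List Char) (c : Char) (cnt cr cv : Int)
    (hR : ¬ ch='r') (hV : ¬ ch='v') (hX : ¬ ch='x') (hcc : ch ≠ c)
    (hnn : ¬ 350*cr-56*cv < 0) :
    apGo c (ch::t) cnt (350*cr-56*cv) = apGo c t cnt (350*cr-56*cv) := by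
  simp [apGo, hR, hV, hX, hcc, hnn]

-- Invariant: when the main loop has suffix l left and balance res = 350*cr - 56*cv ≥ 0,
-- A's rescans over the full string coincide with apGo resumed at l with counts cr, cv.
lemma goA_eq_goB : ∀ (l full : List Char) (cr cv : Int),
    0 ≤ 350 * cr - 56 * cv →
    ap_antes_corte 'r' full = apGo 'r' l cr (350 * cr - 56 * cv) →
    ap_antes_corte 'v' full = apGo 'v' l cv (350 * cr - 56 * cv) →
    goA full l (350 * cr - 56 * cv) = goB l (350 * cr - 56 * cv) := by
  intro l
  induction l with
  | nil => intro full cr cv _ _ _; rfl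
  | cons ch t ih =>
    intro full cr cv hres hr hv
    by_cases hR : ch = 'r'
    · subst hR
      have e : 350 * cr - 56 * cv + 350 = 350 * (cr + 1) - 56 * cv := by ring
      have hres' : ¬ (350 * cr - 56 * cv + 350 < 0) := by omega
      simp only [goA, goB, hres', if_false]
      rw [e]
      exact ih full (cr + 1) cv (by omega)
        (hr.trans (apGo_step_rr t cr cv hres)) (hv.trans (apGo_step_rv t cr cv hres))
    · by_cases hV : ch = 'v'
      · subst hV
        simp only [goA, goB, if_neg hR]
        by_cases hneg : 350 * cr - 56 * cv - 56 < 0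
        · simp [hneg]
        · have e : 350 * cr - 56 * cv - 56 = 350 * cr - 56 * (cv + 1) := by ring
          simp only [if_neg hneg]
          rw [e]
          exact ih full cr (cv + 1) (by omega)
            (hr.trans (apGo_step_vr t cr cv hneg)) (hv.trans (apGo_step_vv t cr cv hneg))
      · by_cases hS : ch = 's'
        · subst hS; simp [goA, goB]
        · by_cases hX : ch = 'x'
          · subst hX
            simp only [goA, goB, if_neg hR, if_neg hV, if_neg hS]
            rw [hr, hv]
            exact apGo_break_x t cr cv
          · have hnn : ¬ (350 * cr - 56 * cv < 0) := by omega
            simp only [goA, goB, if_neg hR, if_neg hV, if_neg hS, if_neg hX, if_neg hnn]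
            have hor : ¬ (ch = 's' ∨ ch = 'x') := by tauto
            simp only [if_neg hor]
            exact ih full cr cv hres
              (hr.trans (apGo_step_other ch t 'r' cr cr cv hR hV hX (by simpa using hR) hnn))
              (hv.trans (apGo_step_other ch t 'v' cv cr cv hR hV hX (by simpa using hV) hnn))

-- ===== VERDICT (by name: the statement is the Claim_ definition above) =====
theorem verificar_transacciones_spec : Claim_equal_verificar_transacciones := by
  intro s _
  show verificar_transacciones s = verificar_transacciones_alt s
  have h := goA_eq_goB s.toList s.toList 0 0 (by norm_num) (by norm_num [ap_antes_corte]) (by norm_num [ap_antes_corte])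
  simpa [verificar_transacciones, verificar_transacciones_alt] using h
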